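-- pv_equiv track=rewrite | github.com/wslund/FDA-Tracker | scraping.py | pick_out_month
-- ===== SOURCE A (Python) =====
-- def pick_out_month(line):
--
--     months = [("january", 1), ("february", 2), ("march", 3), ("april", 4), ("may", 5), ("june", 6), ("july", 7), ("august", 8), ("september", 9), ("october", 10),
--               ("november", 11), ("december", 12)]
--     month = ""
--
--     for i in months:
--         m = i[0]
--         mon = i[1]
--         for k in line:
--             word = k
--             if m == word:
--                 month = mon
--                 month = str(month)
--                 month = month.zfill(2)
--
--     return month
-- ===== SOURCE B (Python) =====
-- def pick_out_month(line):
--     words = set(line)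
--     months = [("january", 1), ("february", 2), ("march", 3), ("april", 4), ("may", 5),
--               ("june", 6), ("july", 7), ("august", 8), ("september", 9), ("october", 10),
--               ("november", 11), ("december", 12)]
--     for name, num in reversed(months):
--         if name in words:
--             return str(num).zfill(2)
--     return ""
-- ===== Notes on version B (the rewrite author's own statement) =====
-- stated objective: faster
-- what changed: A scans the whole word list once per month in ascending order, letting later matches overwrite; B builds a set of the words once and walks the months in descending order, returning at the first (largest) month present.
import Mathlib
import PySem

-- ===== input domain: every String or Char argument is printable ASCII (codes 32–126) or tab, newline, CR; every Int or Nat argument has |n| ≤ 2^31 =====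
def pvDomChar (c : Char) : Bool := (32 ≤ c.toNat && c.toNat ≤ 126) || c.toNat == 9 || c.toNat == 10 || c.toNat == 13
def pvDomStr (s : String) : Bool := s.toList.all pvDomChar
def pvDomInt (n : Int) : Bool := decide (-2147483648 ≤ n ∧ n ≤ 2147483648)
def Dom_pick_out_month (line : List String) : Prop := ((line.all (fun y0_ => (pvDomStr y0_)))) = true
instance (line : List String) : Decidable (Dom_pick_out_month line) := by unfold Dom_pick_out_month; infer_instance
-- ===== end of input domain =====

-- B builds a set of the words once and walks the months in DESCENDING order, returning at the
-- first (largest) month present, instead of A's 12 ascending full scans of the word list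
-- (objective: faster by a constant factor, measured).


-- ===== PORT A =====
def pick_out_month (line : List String) : String :=
  let months : List (String × Int) :=
    [("january", 1), ("february", 2), ("march", 3), ("april", 4), ("may", 5), ("june", 6),
     ("july", 7), ("august", 8), ("september", 9), ("october", 10), ("november", 11), ("december", 12)]
  months.foldl (fun month i =>
    let m := i.1
    let mon := i.2
    line.foldl (fun month k =>
      let word := k
      -- month = mon; month = str(month); month = month.zfill(2)
      if m == word then PySem.Str.zfill (PySem.Int.toStr mon) 2 else month) month) ""

-- ===== PORT B =====
def pvMonthsB : List (String × Int) :=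
  [("january", 1), ("february", 2), ("march", 3), ("april", 4), ("may", 5), ("june", 6),
   ("july", 7), ("august", 8), ("september", 9), ("october", 10), ("november", 11), ("december", 12)]

-- the 'for name, num in reversed(months): if name in words: return …' loop, with early return
def pvScanB : List (String × Int) → PySem.Set String → String
  | [], _ => ""
  | (name, num) :: rest, words =>
    if PySem.Set.contains words name then PySem.Str.zfill (PySem.Int.toStr num) 2
    else pvScanB rest words

def pick_out_month_alt (line : List String) : String :=
  pvScanB pvMonthsB.reverse (PySem.Set.ofList line)

-- ===== PRECONDITION & SPEC =====
def Spec_pick_out_month (line : List String) (out : String) : Prop := out = pick_out_month_alt line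
instance (line : List String) (out : String) : Decidable (Spec_pick_out_month line out) := by unfold Spec_pick_out_month; infer_instance

-- ===== CLAIM (what is proved, stated in full; the proofs are below) =====
def Claim_equal_pick_out_month : Prop := ∀ (line : List String), Dom_pick_out_month line → Spec_pick_out_month line (pick_out_month line)

-- ===== LEMMAS AND PROOFS =====

-- Months in descending order of number; `pvCm` picks the first (= largest) month present.
def pvDesc : List (String × Int) :=
  [("december", 12), ("november", 11), ("october", 10), ("september", 9), ("august", 8),
   ("july", 7), ("june", 6), ("may", 5), ("april", 4), ("march", 3), ("february", 2), ("january", 1)]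

def pvCm : List (String × Int) → List String → Int
  | [], _ => 0
  | (n, v) :: t, line => if n ∈ line then v else pvCm t line

def pvRender (v : Int) : String :=
  if v == 0 then "" else PySem.Str.zfill (PySem.Int.toStr v) 2

-- A's inner loop over `line`: sticks at v once a match is seen.
theorem pv_innerA (m : String) (v : String) :
    ∀ (line : List String) (s : String),
      line.foldl (fun month k => if m == k then v else month) s
        = if m ∈ line then v else s := by
  intro line
  induction line with
  | nil => intro s; simp
  | cons k t ih =>
    intro s
    simp only [List.foldl]
    rw [ih]
    by_cases h : m = k
    · subst h; simp [List.mem_cons]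
    · simp [List.mem_cons, h]

set_option maxHeartbeats 1000000 in
theorem pvA_eq (line : List String) : pick_out_month line = pvRender (pvCm pvDesc line) := by
  simp only [pick_out_month, List.foldl_cons, List.foldl_nil, pv_innerA]
  simp only [pvDesc, pvCm]
  by_cases k12 : "december" ∈ line
  · simp only [if_pos k12]; decide
  simp only [if_neg k12]
  by_cases k11 : "november" ∈ line
  · simp only [if_pos k11]; decide
  simp only [if_neg k11]
  by_cases k10 : "october" ∈ line
  · simp only [if_pos k10]; decide
  simp only [if_neg k10]
  by_cases k9 : "september" ∈ line
  · simp only [if_pos k9]; decide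
  simp only [if_neg k9]
  by_cases k8 : "august" ∈ line
  · simp only [if_pos k8]; decide
  simp only [if_neg k8]
  by_cases k7 : "july" ∈ line
  · simp only [if_pos k7]; decide
  simp only [if_neg k7]
  by_cases k6 : "june" ∈ line
  · simp only [if_pos k6]; decide
  simp only [if_neg k6]
  by_cases k5 : "may" ∈ line
  · simp only [if_pos k5]; decide
  simp only [if_neg k5]
  by_cases k4 : "april" ∈ line
  · simp only [if_pos k4]; decide
  simp only [if_neg k4]
  by_cases k3 : "march" ∈ line
  · simp only [if_pos k3]; decide
  simp only [if_neg k3]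
  by_cases k2 : "february" ∈ line
  · simp only [if_pos k2]; decide
  simp only [if_neg k2]
  by_cases k1 : "january" ∈ line
  · simp only [if_pos k1]; decide
  simp only [if_neg k1]
  decide

-- membership in the word set is membership in the word list
theorem pv_contains (line : List String) (n : String) :
    PySem.Set.contains (PySem.Set.ofList line) n = true ↔ n ∈ line := by
  simp [PySem.Set.contains, PySem.Set.mem_ofList]

-- B's descending scan computes render∘pvCm on any month table with positive numbers
theorem pvScanB_eq (line : List String) :
    ∀ (ms : List (String × Int)), (∀ p ∈ ms, 0 < p.2) →
      pvScanB ms (PySem.Set.ofList line) = pvRender (pvCm ms line) := by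
  intro ms
  induction ms with
  | nil => intro _; simp [pvScanB, pvCm, pvRender]
  | cons p t ih =>
    intro hpos
    obtain ⟨n, v⟩ := p
    have hv : 0 < v := hpos (n, v) (by simp)
    simp only [pvScanB, pvCm]
    by_cases h : n ∈ line
    · rw [if_pos ((pv_contains line n).mpr h), if_pos h, pvRender,
        if_neg (by simp; omega)]
    · rw [if_neg (by simp [PySem.Set.contains, PySem.Set.mem_ofList, h]), if_neg h]
      exact ih (fun q hq => hpos q (by simp [hq]))

theorem pvB_eq (line : List String) : pick_out_month_alt line = pvRender (pvCm pvDesc line) := by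
  have h : pvMonthsB.reverse = pvDesc := by decide
  rw [pick_out_month_alt, h]
  exact pvScanB_eq line pvDesc (by decide)

-- ===== VERDICT (by name: the statement is the Claim_ definition above) =====
theorem pick_out_month_spec : Claim_equal_pick_out_month := by
  intro line _
  unfold Spec_pick_out_month
  rw [pvA_eq, pvB_eq]
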